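-- pv_equiv track=rewrite | github.com/llf-970310/expression-api | analysis-docker/expression/feature_text.py | words_hit
-- ===== SOURCE A (Python) =====
-- def words_hit(text, answer_groups):
--     n = 0
--     for answer_group in answer_groups:
--         for answer in answer_group:
--             if answer in text:
--                 n += 1
--                 break
--     return n
-- ===== SOURCE B (Python) =====
-- def words_hit(text, answer_groups):
--     # Text-driven multi-pattern pass: walk the text positions once and collect
--     # the set of answers that match at some position, then count the groups
--     # that intersect that hit set.
--     answers = {a for g in answer_groups for a in g}
--     hits = {a for i in range(len(text) + 1)
--               for a in answers if text.startswith(a, i)}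
--     return sum(1 for g in answer_groups if not hits.isdisjoint(g))
-- ===== Notes on version B (the rewrite author's own statement) =====
-- stated objective: alternative
-- what changed: B inverts the traversal: instead of A's pattern-driven nested loops running 'answer in text' per group with a break, B deduplicates all answers into one set, makes a single text-position-driven pass collecting the set of answers that match at some start position (text.startswith(a, i)), then counts the groups that intersect that hit set.
import Mathlib
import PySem

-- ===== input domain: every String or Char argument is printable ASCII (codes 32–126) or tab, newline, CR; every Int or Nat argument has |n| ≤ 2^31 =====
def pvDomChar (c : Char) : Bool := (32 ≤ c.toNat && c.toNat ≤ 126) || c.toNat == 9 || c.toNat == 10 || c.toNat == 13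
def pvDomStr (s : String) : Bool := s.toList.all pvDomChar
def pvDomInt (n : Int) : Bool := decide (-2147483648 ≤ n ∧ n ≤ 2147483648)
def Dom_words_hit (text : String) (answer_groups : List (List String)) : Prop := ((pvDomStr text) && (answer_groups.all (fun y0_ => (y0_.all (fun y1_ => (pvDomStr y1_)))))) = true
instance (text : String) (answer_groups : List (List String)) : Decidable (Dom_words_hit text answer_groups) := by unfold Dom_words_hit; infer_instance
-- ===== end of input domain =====

-- B replaces A's per-answer substring searches with one text-position-driven pass that
-- collects the set of answers matching at some position, then counts groups meeting that set
-- (objective: alternative traversal, not measured faster).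

-- ===== PORT A =====
-- inner 'for answer in answer_group: if answer in text: n += 1; break'
def wordsHitInner (text : String) : List String → Int → Int
  | [], n => n
  | a :: rest, n => if PySem.Str.isIn a text then n + 1 else wordsHitInner text rest n

def words_hit (text : String) (answer_groups : List (List String)) : Int :=
  answer_groups.foldl (fun n g => wordsHitInner text g n) 0

-- ===== PORT B =====
-- text.startswith(a, i): prefix test on text[i:] — exact for 0 ≤ i (the only i used: range(len+1))
def startswithFrom (text a : String) (i : Int) : Bool :=
  PySem.Chars.startswith (text.toList.drop i.toNat) a.toList

-- answers = {a for g in answer_groups for a in g}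
def allAnswersB (answer_groups : List (List String)) : PySem.Set String :=
  PySem.Set.ofList answer_groups.flatten

-- hits = {a for i in range(len(text)+1) for a in answers if text.startswith(a, i)}
def hitsB (text : String) (answers : List String) : PySem.Set String :=
  (PySem.List.pyRange 0 ((PySem.Str.len text : Int) + 1) 1).foldl
    (fun s i => answers.foldl
      (fun s a => if startswithFrom text a i then PySem.Set.add s a else s) s)
    PySem.Set.empty

-- hits, computed once
def hitsAll (text : String) (answer_groups : List (List String)) : PySem.Set String :=
  hitsB text (allAnswersB answer_groups)

-- sum(1 for g in answer_groups if not hits.isdisjoint(g))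
def words_hit_alt (text : String) (answer_groups : List (List String)) : Int :=
  answer_groups.foldl
    (fun n g => if !(PySem.Set.isdisjoint (hitsAll text answer_groups) g) then n + 1 else n) 0

-- ===== PRECONDITION & SPEC =====
def Spec_words_hit (text : String) (answer_groups : List (List String)) (out : Int) : Prop := out = words_hit_alt text answer_groups
instance (text : String) (answer_groups : List (List String)) (out : Int) : Decidable (Spec_words_hit text answer_groups out) := by unfold Spec_words_hit; infer_instance

-- ===== CLAIM (what is proved, stated in full; the proofs are below) =====
def Claim_equal_words_hit : Prop := ∀ (text : String) (answer_groups : List (List String)), Dom_words_hit text answer_groups → Spec_words_hit text answer_groups (words_hit text answer_groups)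

-- ===== LEMMAS AND PROOFS =====

-- A's inner loop adds 1 iff some answer of the group occurs in text
theorem wordsHitInner_eq (text : String) (g : List String) (n : Int) :
    wordsHitInner text g n = n + (if g.any (fun a => PySem.Str.isIn a text) then 1 else 0) := by
  induction g generalizing n with
  | nil => simp [wordsHitInner]
  | cons a rest ih =>
    cases h : PySem.Chars.isIn a.toList text.toList with
    | true => simp [wordsHitInner, h]
    | false => simp [wordsHitInner, h, ih]

-- A counts the groups having a hit
theorem words_hit_eq_countP (text : String) (gs : List (List String)) :
    words_hit text gs = (gs.countP (fun g => g.any (fun a => PySem.Str.isIn a text)) : Int) := by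
  unfold words_hit
  have aux : ∀ (l : List (List String)) (n : Int),
      l.foldl (fun n g => wordsHitInner text g n) n
        = n + (l.countP (fun g => g.any (fun a => PySem.Str.isIn a text)) : Int) := by
    intro l
    induction l with
    | nil => simp
    | cons g rest ih =>
      intro n
      rw [List.foldl_cons, ih, wordsHitInner_eq, List.countP_cons]
      cases h : g.any (fun a => PySem.Str.isIn a text) <;> simp [h] <;> push_cast <;> ring
  simpa using aux gs 0

-- membership after the inner 'for a in answers: if startswith: add'
theorem mem_inner_fold (text : String) (i : Int) (answers : List String)
    (s : PySem.Set String) (x : String) :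
    x ∈ answers.foldl
      (fun s a => if startswithFrom text a i then PySem.Set.add s a else s) s
    ↔ x ∈ s ∨ (x ∈ answers ∧ startswithFrom text x i = true) := by
  induction answers generalizing s with
  | nil => simp
  | cons a rest ih =>
    simp only [List.foldl_cons]
    by_cases h : startswithFrom text a i = true
    · rw [if_pos h, ih]
      simp only [PySem.Set.mem_add, List.mem_cons]
      constructor
      · rintro ((hs | rfl) | ⟨hm, hp⟩)
        · exact Or.inl hs
        · exact Or.inr ⟨Or.inl rfl, h⟩
        · exact Or.inr ⟨Or.inr hm, hp⟩
      · rintro (hs | ⟨(rfl | hm), hp⟩)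
        · exact Or.inl (Or.inl hs)
        · exact Or.inl (Or.inr rfl)
        · exact Or.inr ⟨hm, hp⟩
    · rw [if_neg h, ih]
      simp only [List.mem_cons]
      constructor
      · rintro (hs | ⟨hm, hp⟩)
        · exact Or.inl hs
        · exact Or.inr ⟨Or.inr hm, hp⟩
      · rintro (hs | ⟨(rfl | hm), hp⟩)
        · exact Or.inl hs
        · exact absurd hp h
        · exact Or.inr ⟨hm, hp⟩

-- membership after the outer fold over the positions
theorem mem_outer_fold (text : String) (answers : List String)
    (idxs : List Int) (s : PySem.Set String) (x : String) :
    x ∈ idxs.foldl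
      (fun s i => answers.foldl
        (fun s a => if startswithFrom text a i then PySem.Set.add s a else s) s) s
    ↔ x ∈ s ∨ (x ∈ answers ∧ ∃ i ∈ idxs, startswithFrom text x i = true) := by
  induction idxs generalizing s with
  | nil => simp
  | cons i rest ih =>
    simp only [List.foldl_cons]
    rw [ih, mem_inner_fold]
    simp only [List.mem_cons]
    constructor
    · rintro ((hs | ⟨hm, hp⟩) | ⟨hm, j, hj, hp⟩)
      · exact Or.inl hs
      · exact Or.inr ⟨hm, i, Or.inl rfl, hp⟩
      · exact Or.inr ⟨hm, j, Or.inr hj, hp⟩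
    · rintro (hs | ⟨hm, j, (rfl | hj), hp⟩)
      · exact Or.inl (Or.inl hs)
      · exact Or.inl (Or.inr ⟨hm, hp⟩)
      · exact Or.inr ⟨hm, j, hj, hp⟩

-- the one-pass scan finds exactly Python's 'a in text'
theorem exists_idx_iff_isIn (text x : String) :
    (∃ i ∈ PySem.List.pyRange 0 ((PySem.Str.len text : Int) + 1) 1,
        startswithFrom text x i = true)
    ↔ PySem.Str.isIn x text = true := by
  rw [PySem.Str.isIn_eq, ← PySem.Chars.exists_prefix_drop_iff_isIn]
  constructor
  · rintro ⟨i, _, hp⟩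
    exact ⟨i.toNat, (PySem.Chars.startswith_iff _ _).1 hp⟩
  · rintro ⟨j, hp⟩
    by_cases hj : j ≤ text.toList.length
    · refine ⟨(j : Int), ?_, ?_⟩
      · rw [PySem.List.mem_pyRange_one]
        constructor
        · exact_mod_cast Nat.zero_le j
        · rw [PySem.Str.len_eq]; exact_mod_cast Nat.lt_succ_of_le hj
      · unfold startswithFrom
        rw [PySem.Chars.startswith_iff]
        simpa using hp
    · have hdrop : text.toList.drop j = [] :=
        List.drop_eq_nil_of_le (by omega)
      have hx : x.toList = [] := List.prefix_nil.1 (hdrop ▸ hp)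
      refine ⟨0, ?_, ?_⟩
      · rw [PySem.List.mem_pyRange_one]
        constructor
        · omega
        · have : (0 : Int) ≤ (PySem.Str.len text : Int) := Int.natCast_nonneg _
          omega
      · unfold startswithFrom
        rw [PySem.Chars.startswith_iff, hx]
        exact List.nil_prefix
-- hits = the answers occurring in text
theorem mem_hitsB (text : String) (answers : List String) (x : String) :
    x ∈ hitsB text answers ↔ x ∈ answers ∧ PySem.Str.isIn x text = true := by
  unfold hitsB
  rw [mem_outer_fold]
  simp only [PySem.Set.empty, List.not_mem_nil, false_or]
  constructor
  · rintro ⟨hm, hi⟩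
    exact ⟨hm, (exists_idx_iff_isIn text x).1 hi⟩
  · rintro ⟨hm, hi⟩
    exact ⟨hm, (exists_idx_iff_isIn text x).2 hi⟩

-- a group meets the hit set iff some of its answers occurs in text
theorem not_isdisjoint_iff (text : String) (gs : List (List String))
    (g : List String) (hg : g ∈ gs) :
    (!(PySem.Set.isdisjoint (hitsAll text gs) g))
      = g.any (fun a => PySem.Str.isIn a text) := by
  unfold hitsAll
  by_cases h : ∃ a ∈ g, PySem.Str.isIn a text = true
  · obtain ⟨a, ha, hin⟩ := h
    have hmem : a ∈ hitsB text (allAnswersB gs) := by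
      rw [mem_hitsB]
      refine ⟨?_, hin⟩
      unfold allAnswersB
      rw [PySem.Set.mem_ofList, List.mem_flatten]
      exact ⟨g, hg, ha⟩
    have h1 : PySem.Set.isdisjoint (hitsB text (allAnswersB gs)) g = false := by
      by_contra hc
      have := (PySem.Set.isdisjoint_iff _ _).1 (by
        cases hd : PySem.Set.isdisjoint (hitsB text (allAnswersB gs)) g
        · exact absurd hd hc
        · rfl) a hmem
      exact this ha
    rw [h1]
    simp only [Bool.not_false]
    symm; rw [List.any_eq_true]; exact ⟨a, ha, hin⟩
  · push_neg at h
    have h1 : PySem.Set.isdisjoint (hitsB text (allAnswersB gs)) g = true := by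
      rw [PySem.Set.isdisjoint_iff]
      intro a hah hag
      have := (mem_hitsB text (allAnswersB gs) a).1 hah
      exact absurd this.2 (by simpa using h a hag)
    rw [h1]
    simp only [Bool.not_true]
    symm
    rw [List.any_eq_false]
    intro a ha
    simpa using h a ha
-- B counts the same groups
theorem words_hit_alt_eq_countP (text : String) (gs : List (List String)) :
    words_hit_alt text gs
      = (gs.countP (fun g => g.any (fun a => PySem.Str.isIn a text)) : Int) := by
  unfold words_hit_alt
  have aux : ∀ (l : List (List String)), (∀ g ∈ l, g ∈ gs) → ∀ (n : Int),
      l.foldl (fun n g => if !(PySem.Set.isdisjoint (hitsAll text gs) g) then n + 1 else n) n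
        = n + (l.countP (fun g => g.any (fun a => PySem.Str.isIn a text)) : Int) := by
    intro l
    induction l with
    | nil => intro _ n; simp
    | cons g rest ih =>
      intro hsub n
      rw [List.foldl_cons, ih (fun g hg => hsub g (List.mem_cons_of_mem _ hg)),
        not_isdisjoint_iff text gs g (hsub g List.mem_cons_self), List.countP_cons]
      cases h : g.any (fun a => PySem.Str.isIn a text) <;> simp [h] <;> push_cast <;> ring
  simpa using aux gs (fun _ h => h) 0

-- ===== VERDICT (by name: the statement is the Claim_ definition above) =====
theorem words_hit_spec : Claim_equal_words_hit := by
  intro text gs _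
  unfold Spec_words_hit
  rw [words_hit_eq_countP, words_hit_alt_eq_countP]
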